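-- pv_equiv track=rewrite | github.com/DragonBlade1219/Matrix_Learning | sales_data.py | sales_data_func_2
-- ===== SOURCE A (Python) =====
-- def sales_data_func_2(sales_data, frequency_threshold) -> int:
--
--     sub_arrays = [];
--     current_array = [];
--
--     for i in range(len(sales_data)):
--         for j in range(i, len(sales_data)):
--             # Incrementar la frecuencia del elemento actual
--             current_array.append(sales_data[j]);
--             if current_array.count(sales_data[j]) > frequency_threshold:
--                 current_array.pop();
--                 sub_arrays.append(current_array.copy());
--                 current_array.clear();
--                 break;
--             elif j == len(sales_data) - 1:
--                 sub_arrays.append(current_array.copy());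
--                 current_array.clear();
--                 break;
--
--     return max(len(sub_array) for sub_array in sub_arrays)
-- ===== SOURCE B (Python) =====
-- def sales_data_func_2(sales_data, frequency_threshold) -> int:
--     # Amortized O(n) sliding window (two pointers): grow the window on the right,
--     # shrink from the left while the newly added element's frequency exceeds the
--     # threshold; the answer is the longest window seen.  Correct because a
--     # sub-window of a valid window is valid, so the longest valid window starting
--     # anywhere equals the longest valid window ending anywhere.
--     freq = {}
--     best = 0
--     left = 0
--     for right in range(len(sales_data)):
--         x = sales_data[right]
--         freq[x] = freq.get(x, 0) + 1
--         while left <= right and freq[x] > frequency_threshold: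
--             y = sales_data[left]
--             freq[y] = freq[y] - 1
--             left += 1
--         best = max(best, right - left + 1)
--     return best
-- ===== Notes on version B (the rewrite author's own statement) =====
-- stated objective: faster
-- what changed: B replaces A's restart-from-every-start-index scan (which rescans the growing window with list.count at every step) by a single two-pointer sliding window with one incrementally maintained frequency dict, correct because sub-windows of valid windows are valid.
import Mathlib
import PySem

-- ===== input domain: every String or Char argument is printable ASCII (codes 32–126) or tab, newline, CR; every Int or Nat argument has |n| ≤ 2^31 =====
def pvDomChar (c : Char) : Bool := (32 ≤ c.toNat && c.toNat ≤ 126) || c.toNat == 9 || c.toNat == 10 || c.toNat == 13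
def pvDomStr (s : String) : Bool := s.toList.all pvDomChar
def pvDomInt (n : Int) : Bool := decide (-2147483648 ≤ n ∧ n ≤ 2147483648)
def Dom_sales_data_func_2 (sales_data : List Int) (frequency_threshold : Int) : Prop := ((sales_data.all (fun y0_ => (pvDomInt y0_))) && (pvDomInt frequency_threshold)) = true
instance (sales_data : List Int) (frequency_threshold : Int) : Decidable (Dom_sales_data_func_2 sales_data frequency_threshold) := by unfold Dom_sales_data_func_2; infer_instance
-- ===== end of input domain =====

-- B replaces A's restart-from-every-start-index scan (with a list.count rescan per step)
-- by a single two-pointer sliding window over the whole list: objective 'faster'.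

-- ===== PORT A =====
-- inner loop: for j in range(i, len(sales_data)) with break; state (sub_arrays, current_array)
def pvInnerA (sd : List Int) (k : Int) : List Int → List (List Int) → List Int → List (List Int) × List Int
  | [], subs, cur => (subs, cur)
  | j :: js, subs, cur =>
    let x := PySem.List.pyGetD sd j 0   -- j always in range here, so xs[j] cannot raise
    let cur' := cur ++ [x]
    if (PySem.List.count cur' x : Int) > k then (subs ++ [cur'.dropLast], [])
    else if j = (sd.length : Int) - 1 then (subs ++ [cur'], [])
    else pvInnerA sd k js subs cur'

-- outer loop: for i in range(len(sales_data))
def pvOuterA (sd : List Int) (k : Int) : List Int → List (List Int) × List Int → List (List Int) × List Int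
  | [], st => st
  | i :: is, st => pvOuterA sd k is (pvInnerA sd k (PySem.List.pyRange i (sd.length : Int) 1) st.1 st.2)

def sales_data_func_2 (sales_data : List Int) (frequency_threshold : Int) : Int :=
  let st := pvOuterA sales_data frequency_threshold (PySem.List.pyRange 0 (sales_data.length : Int) 1) ([], [])
  -- max(...) raises ValueError on an empty sequence; Pre_ excludes the empty list, where the 0 default is reached
  match PySem.List.max? (st.1.map (fun s => (s.length : Int))) (fun y => y) with
  | some m => m
  | none => 0

-- ===== PORT B =====
-- the `while left <= right and freq[x] > frequency_threshold` shrink loop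
-- (freq[y] -= 1 reads a key that is always present in the reachable states, so insert/getD is exact there)
def pvShrinkB (sd : List Int) (k x right : Int) (freq : PySem.Dict Int Int) (left : Int) : PySem.Dict Int Int × Int :=
  if h : left ≤ right ∧ freq.getD x 0 > k then
    let y := PySem.List.pyGetD sd left 0
    pvShrinkB sd k x right (freq.insert y (freq.getD y 0 - 1)) (left + 1)
  else (freq, left)
termination_by (right + 1 - left).toNat
decreasing_by omega

-- for right in range(len(sales_data)); state (freq, left, best)
def pvLoopB (sd : List Int) (k : Int) : List Int → PySem.Dict Int Int × Int × Int → PySem.Dict Int Int × Int × Int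
  | [], st => st
  | r :: rs, st =>
    let x := PySem.List.pyGetD sd r 0
    let freq1 := st.1.insert x (st.1.getD x 0 + 1)
    let s2 := pvShrinkB sd k x r freq1 st.2.1
    pvLoopB sd k rs (s2.1, s2.2, max st.2.2 (r - s2.2 + 1))

def sales_data_func_2_alt (sales_data : List Int) (frequency_threshold : Int) : Int :=
  (pvLoopB sales_data frequency_threshold (PySem.List.pyRange 0 (sales_data.length : Int) 1)
    (PySem.Dict.empty, 0, 0)).2.2

-- ===== PRECONDITION & SPEC =====
-- A raises ValueError on the empty list (max over an empty generator); excluded here, B returns 0 there.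
def Pre_sales_data_func_2 (sales_data : List Int) (frequency_threshold : Int) : Prop := sales_data ≠ []
instance (sales_data : List Int) (frequency_threshold : Int) : Decidable (Pre_sales_data_func_2 sales_data frequency_threshold) := by unfold Pre_sales_data_func_2; infer_instance
def pvWitness_sales_data_func_2 : List Int × Int := ([1, 2, 1, 1, 3], 2)

def Spec_sales_data_func_2 (sales_data : List Int) (frequency_threshold : Int) (out : Int) : Prop := out = sales_data_func_2_alt sales_data frequency_threshold
instance (sales_data : List Int) (frequency_threshold : Int) (out : Int) : Decidable (Spec_sales_data_func_2 sales_data frequency_threshold out) := by unfold Spec_sales_data_func_2; infer_instance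

-- ===== CLAIM (what is proved, stated in full; the proofs are below) =====
def Claim_equal_sales_data_func_2 : Prop := ∀ (sales_data : List Int) (frequency_threshold : Int), Dom_sales_data_func_2 sales_data frequency_threshold → Pre_sales_data_func_2 sales_data frequency_threshold → Spec_sales_data_func_2 sales_data frequency_threshold (sales_data_func_2 sales_data frequency_threshold)

-- ===== LEMMAS AND PROOFS =====

-- Both programs compute the length of the longest contiguous window in which every
-- element occurs at most `k` times.  `pvWin sd l r` is the window sd[l:r]; `pvValid`
-- says every element of the window stays within the threshold.  We show that A's
-- value (via the greedy per-start decomposition pvBestB below) and B's sliding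
-- window both satisfy the same maximality characterisation, hence are equal.

def pvWin (sd : List Int) (l r : Nat) : List Int := (sd.drop l).take (r - l)

def pvValid (k : Int) (w : List Int) : Prop := ∀ y ∈ w, (w.count y : Int) ≤ k

-- A's greedy inner scan, reformulated per-suffix (proof-side bridge between the two ports):
-- pvPrefixLenB computes the longest valid prefix of a suffix, pvBestB the max over all suffixes.
def pvPrefixLenB (k : Int) : List Int → PySem.Dict Int Int → Int → Int
  | [], _, len => len
  | x :: rest, freq, len =>
    let c := freq.getD x 0 + 1
    if c > k then len
    else pvPrefixLenB k rest (freq.insert x c) (len + 1)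

def pvBestB (k : Int) : List Int → Int → Int
  | [], best => best
  | x :: rest, best => pvBestB k rest (max best (pvPrefixLenB k (x :: rest) PySem.Dict.empty 0))

theorem pvValid_sublist (k : Int) {w w' : List Int} (hs : List.Sublist w' w) (h : pvValid k w) :
    pvValid k w' := by
  intro y hy
  calc (w'.count y : Int) ≤ (w.count y : Int) := by exact_mod_cast hs.count_le y
    _ ≤ k := h y (hs.mem hy)

theorem pvWin_snoc (sd : List Int) {l r : Nat} (hl : l ≤ r) (hr : r < sd.length) :
    pvWin sd l (r+1) = pvWin sd l r ++ [sd[r]] := by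
  unfold pvWin
  have h1 : r + 1 - l = (r - l) + 1 := by omega
  rw [h1, List.take_succ, List.getElem?_drop]
  have h2 : l + (r - l) = r := by omega
  rw [h2, List.getElem?_eq_getElem hr]
  rfl

theorem pvWin_cons (sd : List Int) {l r : Nat} (hl : l < r) (hll : l < sd.length) :
    pvWin sd l r = sd[l] :: pvWin sd (l+1) r := by
  unfold pvWin
  rw [List.drop_eq_getElem_cons hll]
  have h1 : r - l = (r - (l+1)) + 1 := by omega
  rw [h1, List.take_succ_cons]

theorem pvWin_length (sd : List Int) {l r : Nat} (hl : l ≤ r) (hr : r ≤ sd.length) :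
    (pvWin sd l r).length = r - l := by
  unfold pvWin
  rw [List.length_take, List.length_drop]
  omega

theorem pvWin_infix (sd : List Int) (l r : Nat) : pvWin sd l r <:+: sd :=
  List.infix_iff_prefix_suffix.mpr ⟨sd.drop l, List.take_prefix _ _, List.drop_suffix _ _⟩

theorem pvWin_eq_drop_take (sd : List Int) (l r : Nat) : pvWin sd l r = (sd.take r).drop l :=
  List.drop_take.symm

theorem pvWin_self (sd : List Int) (l : Nat) : pvWin sd l l = [] := by
  unfold pvWin; simp

-- greedy prefix scan: its result is a maximal valid extension of `cur`
theorem pv_prefixLen_spec (k : Int) :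
    ∀ (s cur : List Int) (freq : PySem.Dict Int Int),
      (∀ y, freq.getD y 0 = (cur.count y : Int)) →
      pvValid k cur →
      ∃ t : Nat, pvPrefixLenB k s freq (cur.length : Int) = (cur.length : Int) + t ∧ t ≤ s.length ∧
        pvValid k (cur ++ s.take t) ∧ (t = s.length ∨ ¬ pvValid k (cur ++ s.take (t+1))) := by
  intro s
  induction s with
  | nil =>
    intro cur freq _ hv
    exact ⟨0, by simp [pvPrefixLenB], by simp, by simpa using hv, Or.inl rfl⟩
  | cons x rest ih =>
    intro cur freq hf hv
    by_cases hbr : freq.getD x 0 + 1 > k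
    · refine ⟨0, ?_, by simp, by simpa using hv, Or.inr ?_⟩
      · simp only [pvPrefixLenB]
        rw [if_pos hbr]
        simp
      · intro hval
        have hx : x ∈ cur ++ (x :: rest).take 1 := by simp
        have hc := hval x hx
        rw [show (x :: rest).take 1 = [x] from rfl, List.count_append, List.count_cons_self] at hc
        rw [hf x] at hbr
        push_cast at hc
        simp at hc
        omega
    · have hcnt : ((cur ++ [x]).count x : Int) = freq.getD x 0 + 1 := by
        rw [hf x]; push_cast [List.count_append, List.count_cons_self]; simp
      have hf' : ∀ y, (freq.insert x (freq.getD x 0 + 1)).getD y 0 = (((cur ++ [x]).count y : Nat) : Int) := by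
        intro y
        rw [PySem.Dict.getD_insert]
        by_cases hxy : y = x
        · subst hxy; rw [if_pos rfl, hcnt]
        · rw [if_neg hxy, hf y, List.count_append]
          have : [x].count y = 0 := by simp [List.count_singleton]; exact fun h => hxy h.symm
          omega
      have hv' : pvValid k (cur ++ [x]) := by
        intro y hy
        by_cases hxy : y = x
        · subst hxy; rw [hcnt]; omega
        · have hyc : y ∈ cur := by
            rcases List.mem_append.mp hy with h | h
            · exact h
            · simp at h; exact absurd h hxy
          have : (cur ++ [x]).count y = cur.count y := by
            rw [List.count_append]
            have : [x].count y = 0 := by simp [List.count_singleton]; exact fun h => hxy h.symm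
            omega
          rw [this]
          exact hv y hyc
      obtain ⟨t, heq, htle, hvalid, hlast⟩ := ih (cur ++ [x]) (freq.insert x (freq.getD x 0 + 1)) hf' hv'
      refine ⟨t + 1, ?_, by simpa using htle, ?_, ?_⟩
      · simp only [pvPrefixLenB]
        rw [if_neg hbr]
        have hlen : ((cur ++ [x]).length : Int) = (cur.length : Int) + 1 := by push_cast; simp
        calc pvPrefixLenB k rest (freq.insert x (freq.getD x 0 + 1)) ((cur.length : Int) + 1)
            = pvPrefixLenB k rest (freq.insert x (freq.getD x 0 + 1)) (((cur ++ [x]).length : Int)) := by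
              rw [hlen]
          _ = ((cur ++ [x]).length : Int) + t := heq
          _ = (cur.length : Int) + ((t + 1 : Nat) : Int) := by rw [hlen]; push_cast; ring
      · rw [List.take_succ_cons, show cur ++ x :: rest.take t = (cur ++ [x]) ++ rest.take t by simp]
        exact hvalid
      · rcases hlast with h | h
        · left; simp [h]
        · right
          rw [List.take_succ_cons, show cur ++ x :: rest.take (t+1) = (cur ++ [x]) ++ rest.take (t+1) by simp]
          exact h

theorem pv_bestB_ge (k : Int) : ∀ (s : List Int) (b : Int), b ≤ pvBestB k s b := by
  intro s
  induction s with
  | nil => intro b; simp [pvBestB]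
  | cons x rest ih => intro b; exact le_trans (le_max_left _ _) (ih _)

theorem pv_bestB_ub (k : Int) :
    ∀ (s : List Int) (b : Int) (w : List Int), 0 ≤ b → w <:+: s → pvValid k w →
      (w.length : Int) ≤ pvBestB k s b := by
  intro s
  induction s with
  | nil =>
    intro b w hb hw _
    rw [List.infix_nil.mp hw]
    simpa [pvBestB] using hb
  | cons x rest ih =>
    intro b w hb hw hv
    simp only [pvBestB]
    rcases List.infix_cons_iff.mp hw with hpre | hinf
    · obtain ⟨t, heq, htle, hvalid, hlast⟩ :=
        pv_prefixLen_spec k (x :: rest) [] PySem.Dict.empty (by simp) (by intro y hy; simp at hy)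
      simp only [List.length_nil, Nat.cast_zero, zero_add, List.nil_append] at heq hvalid hlast
      by_cases hlen : w.length ≤ t
      · calc (w.length : Int) ≤ (t : Int) := by exact_mod_cast hlen
          _ = pvPrefixLenB k (x :: rest) PySem.Dict.empty 0 := heq.symm
          _ ≤ max b (pvPrefixLenB k (x :: rest) PySem.Dict.empty 0) := le_max_right _ _
          _ ≤ pvBestB k rest (max b (pvPrefixLenB k (x :: rest) PySem.Dict.empty 0)) := pv_bestB_ge k rest _
      · exfalso
        have hwle : w.length ≤ (x :: rest).length := hpre.length_le
        rcases hlast with h | h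
        · omega
        · apply h
          obtain ⟨q, hq⟩ := hpre
          have htake : (x :: rest).take (t+1) = w.take (t+1) := by
            rw [← hq, List.take_append_of_le_length (by omega)]
          rw [htake]
          exact pvValid_sublist k (List.take_sublist _ _) hv
    · exact ih (max b (pvPrefixLenB k (x :: rest) PySem.Dict.empty 0)) w
        (le_trans hb (le_max_left _ _)) hinf hv

theorem pv_bestB_ex (k : Int) :
    ∀ (s : List Int) (b : Int), pvBestB k s b = b ∨
      ∃ w, w <:+: s ∧ pvValid k w ∧ (w.length : Int) = pvBestB k s b := by
  intro s
  induction s with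
  | nil => intro b; exact Or.inl rfl
  | cons x rest ih =>
    intro b
    simp only [pvBestB]
    obtain ⟨t, heq, htle, hvalid, _⟩ :=
      pv_prefixLen_spec k (x :: rest) [] PySem.Dict.empty (by simp) (by intro y hy; simp at hy)
    simp only [List.length_nil, Nat.cast_zero, zero_add, List.nil_append] at heq hvalid
    rcases ih (max b (pvPrefixLenB k (x :: rest) PySem.Dict.empty 0)) with h | ⟨w, hw, hv, hl⟩
    · rw [h]
      rcases le_total (pvPrefixLenB k (x :: rest) PySem.Dict.empty 0) b with hle | hle
      · left; rw [max_eq_left hle]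
      · right
        refine ⟨(x :: rest).take t, (List.take_prefix _ _).isInfix, hvalid, ?_⟩
        rw [max_eq_right hle, heq, List.length_take]
        congr 1
        omega
    · exact Or.inr ⟨w, List.infix_cons hw, hv, hl⟩

-- ===== A-side: the original double loop equals pvBestB =====

theorem pv_inner_eq (sd : List Int) (k : Int) :
    ∀ (rest : List Int) (j : Int) (cur : List Int) (freq : PySem.Dict Int Int) (subs : List (List Int)),
      0 ≤ j → sd.drop j.toNat = rest → rest ≠ [] →
      (∀ y, freq.getD y 0 = (cur.count y : Int)) →
      ∃ w, pvInnerA sd k (PySem.List.pyRange j (sd.length : Int) 1) subs cur = (subs ++ [w], []) ∧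
        (w.length : Int) = pvPrefixLenB k rest freq (cur.length : Int) := by
  intro rest
  induction rest with
  | nil => intro _ _ _ _ _ _ h; exact absurd rfl h
  | cons x rest' ih =>
    intro j cur freq subs hj hdrop _ hinv
    have hjlt : j.toNat < sd.length := by
      by_contra h
      rw [List.drop_eq_nil_of_le (Nat.le_of_not_lt h)] at hdrop
      exact (List.cons_ne_nil x rest') hdrop.symm
    have hjlt' : j < (sd.length : Int) := by omega
    have hx : PySem.List.pyGetD sd j 0 = x := by
      rw [PySem.List.pyGetD_eq_getElem sd 0 hj (by exact_mod_cast hjlt')]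
      have h0 : (sd.drop j.toNat)[0]? = some x := by rw [hdrop]; rfl
      rw [List.getElem?_drop, Nat.add_zero] at h0
      exact (List.getElem?_eq_getElem hjlt).symm.trans h0 |> Option.some.inj
    have hlen : sd.length = j.toNat + 1 + rest'.length := by
      have := congrArg List.length hdrop
      simp at this; omega
    rw [PySem.List.pyRange_one_cons hjlt']
    simp only [pvInnerA, hx]
    have hcnt : (PySem.List.count (cur ++ [x]) x : Int) = freq.getD x 0 + 1 := by
      simp [PySem.List.count_eq, hinv x]
    by_cases hbreak : freq.getD x 0 + 1 > k
    · refine ⟨cur, ?_, ?_⟩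
      · rw [if_pos (by omega : (PySem.List.count (cur ++ [x]) x : Int) > k)]
        simp
      · simp only [pvPrefixLenB]
        rw [if_pos hbreak]
    · rw [if_neg (by omega : ¬ (PySem.List.count (cur ++ [x]) x : Int) > k)]
      by_cases hlast : rest' = []
      · have hj1 : j = (sd.length : Int) - 1 := by subst hlast; simp at hlen; omega
        rw [if_pos hj1]
        refine ⟨cur ++ [x], rfl, ?_⟩
        subst hlast
        simp only [pvPrefixLenB]
        rw [if_neg hbreak]
        simp
      · have hne : j ≠ (sd.length : Int) - 1 := by
          intro h
          have : rest'.length = 0 := by omega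
          exact hlast (List.eq_nil_of_length_eq_zero this)
        rw [if_neg hne]
        have hdrop' : sd.drop (j + 1).toNat = rest' := by
          have h1 : (j + 1).toNat = j.toNat + 1 := by omega
          have h2 : sd.drop (j.toNat + 1) = (sd.drop j.toNat).drop 1 := by rw [List.drop_drop]
          rw [h1, h2, hdrop]; rfl
        have hinv' : ∀ y, (freq.insert x (freq.getD x 0 + 1)).getD y 0 = (((cur ++ [x]).count y : Nat) : Int) := by
          intro y
          by_cases hxy : x = y
          · subst hxy
            rw [PySem.Dict.getD_insert_self freq x (freq.getD x 0 + 1) 0, hinv x]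
            simp
          · rw [PySem.Dict.getD_insert_of_ne freq (freq.getD x 0 + 1) 0 (Ne.symm hxy), hinv y]
            simp [List.count_append, hxy]
        obtain ⟨w, hw1, hw2⟩ := ih (j + 1) (cur ++ [x]) (freq.insert x (freq.getD x 0 + 1)) subs (by omega) hdrop' hlast hinv'
        refine ⟨w, hw1, ?_⟩
        rw [hw2]
        simp only [pvPrefixLenB]
        rw [if_neg hbreak]
        have : (((cur ++ [x]).length : Nat) : Int) = (cur.length : Int) + 1 := by simp
        rw [this]

theorem pv_outer_eq (sd : List Int) (k : Int) :
    ∀ (rest : List Int) (i : Int) (subs : List (List Int)),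
      0 ≤ i → sd.drop i.toNat = rest →
      ∃ ws, pvOuterA sd k (PySem.List.pyRange i (sd.length : Int) 1) (subs, []) = (subs ++ ws, []) ∧
        ws.length = rest.length ∧
        ∀ b : Int, ws.foldl (fun acc w => max acc (w.length : Int)) b = pvBestB k rest b := by
  intro rest
  induction rest with
  | nil =>
    intro i subs hi hdrop
    have : (sd.length : Int) ≤ i := by
      have := List.drop_eq_nil_iff.mp hdrop
      omega
    rw [PySem.List.pyRange_one_eq_nil this]
    exact ⟨[], by simp [pvOuterA], rfl, by intro b; simp [pvBestB]⟩
  | cons x rest' ih =>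
    intro i subs hi hdrop
    have hilt : i.toNat < sd.length := by
      by_contra h
      rw [List.drop_eq_nil_of_le (Nat.le_of_not_lt h)] at hdrop
      exact (List.cons_ne_nil x rest') hdrop.symm
    have hilt' : i < (sd.length : Int) := by omega
    rw [PySem.List.pyRange_one_cons hilt']
    simp only [pvOuterA]
    obtain ⟨w, hw1, hw2⟩ := pv_inner_eq sd k (x :: rest') i [] PySem.Dict.empty subs hi hdrop
      (List.cons_ne_nil x rest') (by intro y; simp [PySem.Dict.getD, PySem.Dict.empty, PySem.Dict.get?])
    rw [hw1]
    have hdrop' : sd.drop (i + 1).toNat = rest' := by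
      have h1 : (i + 1).toNat = i.toNat + 1 := by omega
      have h2 : sd.drop (i.toNat + 1) = (sd.drop i.toNat).drop 1 := by rw [List.drop_drop]
      rw [h1, h2, hdrop]; rfl
    obtain ⟨ws', hws1, hwsl, hws2⟩ := ih (i + 1) (subs ++ [w]) (by omega) hdrop'
    refine ⟨w :: ws', by simpa using hws1, by simpa using hwsl, ?_⟩
    intro b
    simp only [List.foldl_cons, pvBestB]
    rw [hws2, hw2]
    simp

theorem pv_A_eq_bestB (sd : List Int) (k : Int) (hpre : sd ≠ []) :
    sales_data_func_2 sd k = pvBestB k sd 0 := by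
  unfold sales_data_func_2
  obtain ⟨ws, hw1, hwl, hw2⟩ := pv_outer_eq sd k sd 0 [] le_rfl (by simp)
  rw [hw1]
  rcases ws with _ | ⟨w0, ws''⟩
  · simp at hwl
    exact absurd (List.eq_nil_of_length_eq_zero hwl.symm) hpre
  · have hmax := PySem.List.max?_id_cons ((w0.length : Int)) (ws''.map (fun s => (s.length : Int)))
    simp only [List.nil_append, List.map_cons, hmax]
    have hfold : (ws''.map (fun s => (s.length : Int))).foldl max ((w0.length : Int)) =
        (w0 :: ws'').foldl (fun acc w => max acc ((w.length : Int))) 0 := by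
      rw [List.foldl_map]
      simp only [List.foldl_cons]
      have h0 : max (0 : Int) ((w0.length : Int)) = (w0.length : Int) :=
        max_eq_right (Int.natCast_nonneg _)
      rw [h0]
    rw [hfold, hw2 0]

-- ===== B-side: the sliding window is the same maximum =====

-- the shrink loop: it stops at the least left end making the current window valid
theorem pv_shrink_spec (sd : List Int) (k x : Int) (r : Nat) (hr : r < sd.length) (hx : sd[r] = x) :
    ∀ (t L : Nat) (freq : PySem.Dict Int Int),
      r + 1 - L ≤ t → L ≤ r + 1 →
      (∀ y, freq.getD y 0 = ((pvWin sd L (r+1)).count y : Int)) →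
      (∀ y ∈ pvWin sd L (r+1), y ≠ x → ((pvWin sd L (r+1)).count y : Int) ≤ k) →
      ∃ (L' : Nat) (freq' : PySem.Dict Int Int),
        pvShrinkB sd k x (r : Int) freq (L : Int) = (freq', (L' : Int)) ∧
        L ≤ L' ∧ L' ≤ r + 1 ∧
        (∀ y, freq'.getD y 0 = ((pvWin sd L' (r+1)).count y : Int)) ∧
        pvValid k (pvWin sd L' (r+1)) ∧
        (∀ l, L ≤ l → l < L' → ¬ pvValid k (pvWin sd l (r+1))) := by
  intro t
  induction t with
  | zero =>
    intro L freq h0 hL hf hnx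
    have hL1 : L = r + 1 := by omega
    subst hL1
    refine ⟨r + 1, freq, ?_, le_rfl, le_rfl, hf, ?_, ?_⟩
    · rw [pvShrinkB, dif_neg]
      intro ⟨h1, _⟩
      have : ((r : Nat) : Int) + 1 ≤ (r : Int) := by exact_mod_cast h1
      omega
    · rw [pvWin_self]
      intro y hy
      simp at hy
    · intro l h1 h2
      omega
  | succ t ih =>
    intro L freq h0 hL hf hnx
    by_cases hcase : L ≤ r ∧ freq.getD x 0 > k
    · obtain ⟨hLr, hgt⟩ := hcase
      have hLlen : L < sd.length := lt_of_le_of_lt hLr hr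
      have hwincons : pvWin sd L (r+1) = sd[L] :: pvWin sd (L+1) (r+1) := pvWin_cons sd (by omega) hLlen
      have hgetL : PySem.List.pyGetD sd (L : Int) 0 = sd[L] := by
        rw [PySem.List.pyGetD_natCast]
        exact List.getD_eq_getElem sd 0 hLlen
      have hstep : pvShrinkB sd k x (r : Int) freq (L : Int) =
          pvShrinkB sd k x (r : Int) (freq.insert sd[L] (freq.getD sd[L] 0 - 1)) ((L : Int) + 1) := by
        rw [pvShrinkB, dif_pos ⟨by exact_mod_cast hLr, hgt⟩]
        rw [hgetL]
      have hf' : ∀ y, (freq.insert sd[L] (freq.getD sd[L] 0 - 1)).getD y 0 =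
          ((pvWin sd (L+1) (r+1)).count y : Int) := by
        intro y
        rw [PySem.Dict.getD_insert]
        by_cases hxy : y = sd[L]
        · subst hxy
          rw [if_pos rfl, hf _, hwincons, List.count_cons_self]
          push_cast; ring
        · rw [if_neg hxy, hf y, hwincons, List.count_cons_of_ne (Ne.symm hxy)]
      have hnx' : ∀ y ∈ pvWin sd (L+1) (r+1), y ≠ x → ((pvWin sd (L+1) (r+1)).count y : Int) ≤ k := by
        intro y hy hyx
        have hsub : List.Sublist (pvWin sd (L+1) (r+1)) (pvWin sd L (r+1)) := by
          rw [hwincons]; exact List.sublist_cons_self _ _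
        calc ((pvWin sd (L+1) (r+1)).count y : Int) ≤ ((pvWin sd L (r+1)).count y : Int) := by
              exact_mod_cast hsub.count_le y
          _ ≤ k := hnx y (hsub.mem hy) hyx
      have hinvL : ¬ pvValid k (pvWin sd L (r+1)) := by
        intro hval
        have hxmem : x ∈ pvWin sd L (r+1) := by
          rw [pvWin_snoc sd hLr hr, hx]
          simp
        have := hval x hxmem
        rw [← hf x] at this
        omega
      obtain ⟨L', freq', heq, h1, h2, h3, h4, h5⟩ :=
        ih (L+1) (freq.insert sd[L] (freq.getD sd[L] 0 - 1)) (by omega) (by omega) hf' hnx'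
      refine ⟨L', freq', ?_, by omega, h2, h3, h4, ?_⟩
      · rw [hstep]
        have hc : ((L : Int) + 1) = (((L + 1 : Nat)) : Int) := by push_cast; ring
        rw [hc, heq]
      · intro l hl1 hl2
        rcases Nat.eq_or_lt_of_le hl1 with h | h
        · rw [← h]; exact hinvL
        · exact h5 l (by omega) hl2
    · refine ⟨L, freq, ?_, le_rfl, hL, hf, ?_, ?_⟩
      · rw [pvShrinkB, dif_neg]
        intro ⟨h1, h2⟩
        exact hcase ⟨by exact_mod_cast h1, h2⟩
      · by_cases hLr : L ≤ r
        · intro y hy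
          by_cases hxy : y = x
          · subst hxy
            rw [← hf y]
            rcases not_and_or.mp hcase with h | h
            · exact absurd hLr h
            · omega
          · exact hnx y hy hxy
        · have hL1 : L = r + 1 := by omega
          subst hL1
          rw [pvWin_self]
          intro y hy
          simp at hy
      · intro l h1 h2
        omega

-- the main loop keeps `best` equal to the longest valid window inside the processed prefix
theorem pv_loop_spec (sd : List Int) (k : Int) :
    ∀ (rest : List Int) (r : Nat) (freq : PySem.Dict Int Int) (L : Nat) (best : Int),
      sd.drop r = rest → L ≤ r →
      (∀ y, freq.getD y 0 = ((pvWin sd L r).count y : Int)) →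
      pvValid k (pvWin sd L r) →
      (∀ l, l < L → ¬ pvValid k (pvWin sd l r)) →
      (∃ w, w <:+: sd ∧ pvValid k w ∧ (w.length : Int) = best) →
      (∀ w, w <:+: sd.take r → pvValid k w → (w.length : Int) ≤ best) →
      (∃ w, w <:+: sd ∧ pvValid k w ∧ (w.length : Int) =
          (pvLoopB sd k (PySem.List.pyRange (r : Int) (sd.length : Int) 1) (freq, (L : Int), best)).2.2) ∧
      (∀ w, w <:+: sd → pvValid k w → (w.length : Int) ≤
          (pvLoopB sd k (PySem.List.pyRange (r : Int) (sd.length : Int) 1) (freq, (L : Int), best)).2.2) := by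
  intro rest
  induction rest with
  | nil =>
    intro r freq L best hdrop hLr hf hv hmin hB1 hB2
    have hlen : sd.length ≤ r := by
      have := List.drop_eq_nil_iff.mp hdrop
      omega
    rw [PySem.List.pyRange_one_eq_nil (by exact_mod_cast hlen)]
    simp only [pvLoopB]
    exact ⟨hB1, fun w hw hv' => hB2 w (by rwa [List.take_of_length_le hlen]) hv'⟩
  | cons xx rest' ih =>
    intro r freq L best hdrop hLr hf hv hmin hB1 hB2
    have hrlen : r < sd.length := by
      by_contra h
      rw [List.drop_eq_nil_of_le (Nat.le_of_not_lt h)] at hdrop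
      exact (List.cons_ne_nil xx rest') hdrop.symm
    have hdropc : sd.drop r = sd[r] :: sd.drop (r+1) := List.drop_eq_getElem_cons hrlen
    have hxx : sd[r] = xx := by rw [hdropc] at hdrop; exact (List.cons.injEq _ _ _ _ ▸ hdrop).1
    have hdrop' : sd.drop (r+1) = rest' := by rw [hdropc] at hdrop; exact (List.cons.injEq _ _ _ _ ▸ hdrop).2
    rw [PySem.List.pyRange_one_cons (by exact_mod_cast hrlen)]
    simp only [pvLoopB]
    have hgetr : PySem.List.pyGetD sd (r : Int) 0 = sd[r] := by
      rw [PySem.List.pyGetD_natCast]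
      exact List.getD_eq_getElem sd 0 hrlen
    rw [hgetr]
    set x := sd[r] with hxdef
    have hsnoc : pvWin sd L (r+1) = pvWin sd L r ++ [x] := pvWin_snoc sd hLr hrlen
    have hf1 : ∀ y, (freq.insert x (freq.getD x 0 + 1)).getD y 0 = ((pvWin sd L (r+1)).count y : Int) := by
      intro y
      rw [PySem.Dict.getD_insert, hsnoc, List.count_append]
      by_cases hxy : y = x
      · subst hxy
        rw [if_pos rfl, hf _]
        simp
      · rw [if_neg hxy, hf y]
        have : [x].count y = 0 := by simp [List.count_singleton]; exact fun h => hxy h.symm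
        omega
    have hnx1 : ∀ y ∈ pvWin sd L (r+1), y ≠ x → ((pvWin sd L (r+1)).count y : Int) ≤ k := by
      intro y hy hyx
      have hyc : y ∈ pvWin sd L r := by
        rw [hsnoc] at hy
        rcases List.mem_append.mp hy with h | h
        · exact h
        · simp at h; exact absurd h hyx
      have : (pvWin sd L (r+1)).count y = (pvWin sd L r).count y := by
        rw [hsnoc, List.count_append]
        have : [x].count y = 0 := by simp [List.count_singleton]; exact fun h => hyx h.symm
        omega
      rw [this]
      exact hv y hyc
    obtain ⟨L', freq2, hsh, hLL', hL'le, hf2, hv2, hintv⟩ :=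
      pv_shrink_spec sd k x r hrlen rfl (r+1) L (freq.insert x (freq.getD x 0 + 1))
        (by omega) (by omega) hf1 hnx1
    rw [hsh]
    have hmin' : ∀ l, l < L' → ¬ pvValid k (pvWin sd l (r+1)) := by
      intro l hl
      rcases lt_or_ge l L with h | h
      · intro hval
        apply hmin l h
        have hsn : pvWin sd l (r+1) = pvWin sd l r ++ [x] := pvWin_snoc sd (by omega) hrlen
        exact pvValid_sublist k (by rw [hsn]; exact List.sublist_append_left _ _) hval
      · exact hintv l h hl
    have hcastr : ((r : Int) + 1) = (((r + 1 : Nat)) : Int) := by push_cast; ring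
    have hbestcast : (r : Int) - (L' : Int) + 1 = (((r + 1 - L' : Nat)) : Int) := by
      push_cast [Nat.cast_sub hL'le]
      ring
    have hwinlen : ((pvWin sd L' (r+1)).length : Int) = (r : Int) - (L' : Int) + 1 := by
      rw [pvWin_length sd hL'le (by omega)]
      omega
    have hB1' : ∃ w, w <:+: sd ∧ pvValid k w ∧ (w.length : Int) = max best ((r : Int) - (L' : Int) + 1) := by
      rcases le_total ((r : Int) - (L' : Int) + 1) best with hle | hle
      · rw [max_eq_left hle]; exact hB1
      · rw [max_eq_right hle]
        exact ⟨pvWin sd L' (r+1), pvWin_infix sd L' (r+1), hv2, hwinlen⟩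
    have hB2' : ∀ w, w <:+: sd.take (r+1) → pvValid k w →
        (w.length : Int) ≤ max best ((r : Int) - (L' : Int) + 1) := by
      intro w hw hvw
      obtain ⟨tl, hwp, hts⟩ := List.infix_iff_prefix_suffix.mp hw
      obtain ⟨u, hu⟩ := hts
      obtain ⟨vv, hvveq⟩ := hwp
      have hplen : (sd.take (r+1)).length = r + 1 := by
        rw [List.length_take]; omega
      by_cases hvv : vv = []
      · -- w is a suffix of the processed prefix: it is the window [u.length, r+1)
        subst hvv
        rw [List.append_nil] at hvveq
        subst hvveq
        have hweq : pvWin sd u.length (r+1) = w := by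
          rw [pvWin_eq_drop_take, ← hu, List.drop_left]
        have hul : L' ≤ u.length := by
          by_contra hcon
          exact hmin' u.length (by omega) (by rw [hweq]; exact hvw)
        have hlw : u.length + w.length = r + 1 := by
          have h1 := congrArg List.length hu
          rw [List.length_append, hplen] at h1
          omega
        have hle2 : (w.length : Int) ≤ (r : Int) - (L' : Int) + 1 := by
          have h1 : (L' : Int) ≤ (u.length : Int) := by exact_mod_cast hul
          have h2 : (u.length : Int) + (w.length : Int) = (r : Int) + 1 := by exact_mod_cast hlw
          omega
        exact le_trans hle2 (le_max_right _ _)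
      · -- w sits strictly inside: it is already in the prefix of length r
        have hlt : u.length + w.length ≤ r := by
          have h1 := congrArg List.length hu
          rw [List.length_append, hplen] at h1
          have h2 := congrArg List.length hvveq
          rw [List.length_append] at h2
          have hvvpos : 0 < vv.length := List.length_pos_iff.mpr hvv
          omega
        have hpre : u ++ w <+: sd.take (r+1) := ⟨vv, by rw [List.append_assoc, hvveq, hu]⟩
        have hpre' : u ++ w <+: sd.take r := by
          rw [List.prefix_take_iff]
          exact ⟨hpre.trans (List.take_prefix _ _), by rw [List.length_append]; exact hlt⟩
        obtain ⟨q, hq⟩ := hpre'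
        have hwin : w <:+: sd.take r := ⟨u, q, by rw [← hq]⟩
        exact le_trans (hB2 w hwin hvw) (le_max_left _ _)
    have hres := ih (r+1) freq2 L' (max best ((r : Int) - (L' : Int) + 1)) hdrop' hL'le hf2 hv2 hmin' hB1' hB2'
    rw [hcastr]
    exact hres

-- alt satisfies the same maximality characterisation
theorem pv_alt_isMax (sd : List Int) (k : Int) :
    (∃ w, w <:+: sd ∧ pvValid k w ∧ (w.length : Int) = sales_data_func_2_alt sd k) ∧
    (∀ w, w <:+: sd → pvValid k w → (w.length : Int) ≤ sales_data_func_2_alt sd k) := by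
  unfold sales_data_func_2_alt
  have h := pv_loop_spec sd k sd 0 PySem.Dict.empty 0 0 (by simp) le_rfl
    (by intro y; rw [pvWin_self]; simp)
    (by rw [pvWin_self]; intro y hy; simp at hy)
    (by intro l hl; exact absurd hl (Nat.not_lt_zero l))
    ⟨[], List.nil_infix, by intro y hy; simp at hy, by simp⟩
    (by intro w hw _
        rw [List.take_zero] at hw
        rw [List.infix_nil.mp hw]
        simp)
  simpa using h

-- ===== VERDICT (by name: the statement is the Claim_ definition above) =====
theorem sales_data_func_2_spec : Claim_equal_sales_data_func_2 := by
  intro sd k _ hpre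
  unfold Spec_sales_data_func_2
  rw [pv_A_eq_bestB sd k hpre]
  obtain ⟨⟨w1, hw1i, hw1v, hw1l⟩, hub1⟩ := pv_alt_isMax sd k
  have hub2 : ∀ w, w <:+: sd → pvValid k w → (w.length : Int) ≤ pvBestB k sd 0 :=
    fun w hw hv => pv_bestB_ub k sd 0 w le_rfl hw hv
  have hex2 : ∃ w, w <:+: sd ∧ pvValid k w ∧ (w.length : Int) = pvBestB k sd 0 := by
    rcases pv_bestB_ex k sd 0 with h | h
    · exact ⟨[], List.nil_infix, by intro y hy; simp at hy, by simp [h]⟩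
    · exact h
  obtain ⟨w2, hw2i, hw2v, hw2l⟩ := hex2
  apply le_antisymm
  · rw [← hw2l]
    exact hub1 w2 hw2i hw2v
  · rw [← hw1l]
    exact hub2 w1 hw1i hw1v
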